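-- pv_equiv track=rewrite | github.com/MarcinGladkowski/advent_of_code_2025 | day_2/main.py | find_invalid_repeated_ids
-- ===== SOURCE A (Python) =====
-- def find_invalid_repeated_ids(id_range: tuple[int]):
--     invalid_ids = []
--     for range_number in range(id_range[0], id_range[1] + 1):
--
--         value = str(range_number)
--
--         first_half = value[:len(value)//2]
--         second_half = value[len(value)//2:]
--
--         if first_half == second_half:
--             invalid_ids.append(range_number)
--
--     return invalid_ids
-- ===== SOURCE B (Python) =====
-- def find_invalid_repeated_ids(id_range):
--     # same return value as A; enumerates valid ids h*(10**k+1) directly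
--     lo, hi = id_range[0], id_range[1]
--     invalid_ids = []
--     if hi < 11:
--         return invalid_ids
--     digits = len(str(hi))
--     p = 1  # 10 ** (k - 1) for the current half-width k
--     for _ in range(digits // 2):
--         q = p * 10
--         m = q + 1
--         h_lo = max(p, -(-lo // m))
--         h_hi = min(q - 1, hi // m)
--         for h in range(h_lo, h_hi + 1):
--             invalid_ids.append(h * m)
--         p = q
--     return invalid_ids
-- ===== Notes on version B (the rewrite author's own statement) =====
-- stated objective: alternative
-- what changed: Instead of scanning every integer in the range and comparing string halves, B directly enumerates the valid ids h*(10^k+1) for each half-width k, clamping h to [max(10^(k-1), ceil(lo/m)), min(10^k-1, hi//m)], so it only touches the ids it outputs.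
import Mathlib
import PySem

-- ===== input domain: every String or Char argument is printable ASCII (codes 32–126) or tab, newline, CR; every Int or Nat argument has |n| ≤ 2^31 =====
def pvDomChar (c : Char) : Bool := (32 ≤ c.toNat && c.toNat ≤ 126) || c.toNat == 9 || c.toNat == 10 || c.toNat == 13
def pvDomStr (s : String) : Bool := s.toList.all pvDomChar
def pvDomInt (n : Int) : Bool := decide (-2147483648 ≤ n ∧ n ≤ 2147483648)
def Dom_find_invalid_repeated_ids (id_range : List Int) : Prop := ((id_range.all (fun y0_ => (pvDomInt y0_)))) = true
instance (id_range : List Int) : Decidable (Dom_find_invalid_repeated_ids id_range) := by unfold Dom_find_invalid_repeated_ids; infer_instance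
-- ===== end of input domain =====

-- ===== PORT A =====
-- Port of A: scan every integer in [id_range[0], id_range[1]] and keep those whose
-- decimal string splits into two equal halves.
-- ===== PORT B =====
--(below, after A): B directly enumerates the valid ids h*(10^k+1), h a k-digit number,
-- clamped to the requested range.
def find_invalid_repeated_ids (id_range : List Int) : List Int :=
  (PySem.List.pyRange (PySem.List.pyGetD id_range 0 0)
      (PySem.List.pyGetD id_range 1 0 + 1) 1).foldl
    (fun invalid_ids range_number =>
      let value := PySem.Int.toStr range_number
      let half := PySem.Int.floordiv (PySem.Str.len value) 2
      let first_half := PySem.Str.slice value none (some half)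
      let second_half := PySem.Str.slice value (some half) none
      if first_half == second_half then invalid_ids ++ [range_number] else invalid_ids)
    []

def find_invalid_repeated_ids_alt (id_range : List Int) : List Int :=
  let lo := PySem.List.pyGetD id_range 0 0
  let hi := PySem.List.pyGetD id_range 1 0
  if hi < 11 then []
  else
    let digits := PySem.Str.len (PySem.Int.toStr hi)
    ((PySem.List.pyRange 0 (PySem.Int.floordiv digits 2) 1).foldl
      (fun (st : Int × List Int) _ =>
        let p := st.1
        let q := p * 10
        let m := q + 1
        let hLo := max p (-(PySem.Int.floordiv (-lo) m))
        let hHi := min (q - 1) (PySem.Int.floordiv hi m)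
        (q, (PySem.List.pyRange hLo (hHi + 1) 1).foldl (fun acc h => acc ++ [h * m]) st.2))
      (1, ([] : List Int))).2


-- ===== PRECONDITION & SPEC =====
-- Pre_ excludes only lists with fewer than 2 elements, on which A raises IndexError.
def Pre_find_invalid_repeated_ids (id_range : List Int) : Prop := 2 ≤ id_range.length
instance (id_range : List Int) : Decidable (Pre_find_invalid_repeated_ids id_range) := by
  unfold Pre_find_invalid_repeated_ids; infer_instance
def pvWitness_find_invalid_repeated_ids : List Int := [5, 120]
def Spec_find_invalid_repeated_ids (id_range : List Int) (out : List Int) : Prop := out = find_invalid_repeated_ids_alt id_range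
instance (id_range : List Int) (out : List Int) : Decidable (Spec_find_invalid_repeated_ids id_range out) := by unfold Spec_find_invalid_repeated_ids; infer_instance

-- ===== CLAIM (what is proved, stated in full; the proofs are below) =====
def Claim_equal_find_invalid_repeated_ids : Prop := ∀ (id_range : List Int), Dom_find_invalid_repeated_ids id_range → Pre_find_invalid_repeated_ids id_range → Spec_find_invalid_repeated_ids id_range (find_invalid_repeated_ids id_range)

-- ===== LEMMAS AND PROOFS =====

def digs (n : Nat) : List Char :=
  if h : n < 10 then [Nat.digitChar n]
  else digs (n / 10) ++ [Nat.digitChar (n % 10)]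
  decreasing_by exact Nat.div_lt_self (by omega) (by norm_num)

lemma digs_lt (n : Nat) (h : n < 10) : digs n = [Nat.digitChar n] := by
  rw [digs]; simp [h]

lemma digs_ge (n : Nat) (h : 10 ≤ n) :
    digs n = digs (n / 10) ++ [Nat.digitChar (n % 10)] := by
  rw [digs]; simp [Nat.not_lt.mpr h]

lemma toDigitsCore_eq_digs (f : Nat) : ∀ n l, n < f → Nat.toDigitsCore 10 f n l = digs n ++ l := by
  induction f with
  | zero => intro n l h; omega
  | succ f ih =>
    intro n l h
    show (if n / 10 = 0 then Nat.digitChar (n % 10) :: l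
          else Nat.toDigitsCore 10 f (n / 10) (Nat.digitChar (n % 10) :: l)) = digs n ++ l
    by_cases h10 : n < 10
    · rw [digs_lt n h10]
      simp [Nat.div_eq_of_lt h10, Nat.mod_eq_of_lt h10]
    · rw [if_neg (by omega), ih (n / 10) _ (by omega), digs_ge n (by omega)]
      simp

lemma toChars_nonneg (n : Int) (h : 0 ≤ n) : PySem.Int.toChars n = digs n.toNat := by
  rw [PySem.Int.toChars, if_neg (by omega)]
  rw [show Nat.toDigits 10 n.toNat = Nat.toDigitsCore 10 (n.toNat + 1) n.toNat [] from rfl]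
  rw [toDigitsCore_eq_digs _ _ _ (by omega)]
  simp

lemma toChars_neg (n : Int) (h : n < 0) : PySem.Int.toChars n = '-' :: digs n.natAbs := by
  rw [PySem.Int.toChars, if_pos h]
  rw [show Nat.toDigits 10 n.natAbs = Nat.toDigitsCore 10 (n.natAbs + 1) n.natAbs [] from rfl]
  rw [toDigitsCore_eq_digs _ _ _ (by omega)]
  simp

lemma digitChar_ne_dash (x : Nat) (hx : x < 10) : Nat.digitChar x ≠ '-' := by
  interval_cases x <;> decide

lemma digitChar_inj (x y : Nat) (hx : x < 10) (hy : y < 10)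
    (h : Nat.digitChar x = Nat.digitChar y) : x = y := by
  interval_cases x <;> interval_cases y <;> simp_all <;> revert h <;> decide

def pad : Nat → Nat → List Char
  | 0, _ => []
  | k+1, n => pad k (n / 10) ++ [Nat.digitChar (n % 10)]

lemma digs_ne_nil (n : Nat) : digs n ≠ [] := by
  by_cases h : n < 10
  · rw [digs_lt n h]; simp
  · rw [digs_ge n (by omega)]; simp

lemma mem_digs (c : Char) (n : Nat) : c ∈ digs n → ∃ x, x < 10 ∧ c = Nat.digitChar x := by
  induction n using Nat.strong_induction_on with
  | _ n ih =>
    by_cases h : n < 10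
    · rw [digs_lt n h]; intro hc; exact ⟨n, h, by simpa using hc⟩

    · rw [digs_ge n (by omega)]
      intro hc
      rcases List.mem_append.mp hc with hc | hc
      · exact ih (n / 10) (Nat.div_lt_self (by omega) (by norm_num)) hc
      · exact ⟨n % 10, Nat.mod_lt _ (by norm_num), by simpa using hc⟩

lemma length_digs_le (k : Nat) : ∀ n, n < 10 ^ k → 0 < k → (digs n).length ≤ k := by
  induction k with
  | zero => intro n _ hk; omega
  | succ k ih =>
    intro n hn _
    by_cases h : n < 10
    · rw [digs_lt n h]; simp
    · rw [digs_ge n (by omega)]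
      have hk : 0 < k := by
        by_contra hk0
        have : k = 0 := by omega
        subst this; simp [pow_succ] at hn; omega
      have : n / 10 < 10 ^ k := by
        rw [Nat.div_lt_iff_lt_mul (by norm_num)]
        calc n < 10 ^ (k+1) := hn
        _ = 10 ^ k * 10 := by ring
      have := ih (n / 10) this hk
      simp [List.length_append]
      omega

lemma lt_of_length_digs_le (k : Nat) : ∀ n, (digs n).length ≤ k → n < 10 ^ k := by
  induction k with
  | zero =>
    intro n h
    exfalso
    have := digs_ne_nil n
    have : 0 < (digs n).length := List.length_pos_iff.mpr this
    omega
  | succ k ih =>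
    intro n h
    by_cases h10 : n < 10
    · have h1 : (10:Nat) ≤ 10 ^ (k+1) := by
        calc (10:Nat) = 10 ^ 1 := by norm_num
        _ ≤ 10 ^ (k+1) := Nat.pow_le_pow_right (by norm_num) (by omega)
      omega
    · rw [digs_ge n (by omega)] at h
      simp [List.length_append] at h
      have h1 := ih (n / 10) (by omega)
      have h3 : (n / 10 + 1) * 10 ≤ 10 ^ k * 10 := Nat.mul_le_mul_right 10 h1
      have h4 : n < (n / 10 + 1) * 10 := by omega
      calc n < 10 ^ k * 10 := by omega
      _ = 10 ^ (k+1) := by ring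

lemma le_of_length_digs (n : Nat) (h : 0 < n) : 10 ^ ((digs n).length - 1) ≤ n := by
  induction n using Nat.strong_induction_on with
  | _ n ih =>
    by_cases h10 : n < 10
    · rw [digs_lt n h10]; simpa using h
    · rw [digs_ge n (by omega)]
      have hd : 0 < n / 10 := Nat.div_pos (by omega) (by norm_num)
      have := ih (n / 10) (Nat.div_lt_self (by omega) (by norm_num)) hd
      simp only [List.length_append, List.length_cons, List.length_nil]
      have hlen : 0 < (digs (n/10)).length := List.length_pos_iff.mpr (digs_ne_nil _)
      have : 10 ^ ((digs (n/10)).length - 1 + 1) ≤ n / 10 * 10 := by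
        rw [pow_succ]
        exact Nat.mul_le_mul_right 10 this
      calc 10 ^ ((digs (n/10)).length + 1 - 1) = 10 ^ ((digs (n/10)).length - 1 + 1) := by
            congr 1; omega
      _ ≤ n / 10 * 10 := this
      _ ≤ n := by omega

lemma length_digs_mono (a b : Nat) (h : a ≤ b) : (digs a).length ≤ (digs b).length := by
  by_contra hlt
  rw [not_le] at hlt
  have hb : b < 10 ^ (digs b).length := lt_of_length_digs_le _ b le_rfl
  have hpos : 0 < (digs b).length := List.length_pos_iff.mpr (digs_ne_nil b)
  have ha : 0 < a := by
    by_contra h0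
    have : a = 0 := by omega
    subst this
    rw [digs_lt 0 (by norm_num)] at hlt
    have : (digs b).length < 1 := by simpa using hlt
    omega
  have h1 : 10 ^ ((digs a).length - 1) ≤ a := le_of_length_digs a ha
  have h2 : (digs b).length ≤ (digs a).length - 1 := by omega
  have h3 : (10:Nat) ^ (digs b).length ≤ 10 ^ ((digs a).length - 1) :=
    Nat.pow_le_pow_right (by norm_num) h2
  omega

lemma length_pad (k : Nat) : ∀ n, (pad k n).length = k := by
  induction k with
  | zero => intro n; rfl
  | succ k ih => intro n; simp [pad, ih]

lemma pad_eq_digs (k : Nat) : ∀ n, (digs n).length = k → pad k n = digs n := by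
  induction k with
  | zero =>
    intro n h
    exact absurd (List.length_pos_iff.mpr (digs_ne_nil n)) (by omega)
  | succ k ih =>
    intro n h
    by_cases h10 : n < 10
    · rw [digs_lt n h10] at h ⊢
      simp at h
      subst h
      simp [pad, Nat.mod_eq_of_lt h10]
    · rw [digs_ge n (by omega)] at h ⊢
      simp at h
      rw [show pad (k+1) n = pad k (n / 10) ++ [Nat.digitChar (n % 10)] from rfl]
      rw [ih (n / 10) h]

lemma pad_inj (k : Nat) : ∀ a b, a < 10 ^ k → b < 10 ^ k → pad k a = pad k b → a = b := by
  induction k with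
  | zero => intro a b ha hb _; omega
  | succ k ih =>
    intro a b ha hb h
    rw [show pad (k+1) a = pad k (a / 10) ++ [Nat.digitChar (a % 10)] from rfl,
        show pad (k+1) b = pad k (b / 10) ++ [Nat.digitChar (b % 10)] from rfl] at h
    have hlen := List.append_inj h (by rw [length_pad, length_pad])
    have h1 : a % 10 = b % 10 := by
      have := hlen.2
      simp at this
      exact digitChar_inj _ _ (Nat.mod_lt _ (by norm_num)) (Nat.mod_lt _ (by norm_num)) this
    have h2 : a / 10 = b / 10 := by
      refine ih (a / 10) (b / 10) ?_ ?_ hlen.1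
      · rw [Nat.div_lt_iff_lt_mul (by norm_num)]
        calc a < 10 ^ (k+1) := ha
        _ = 10 ^ k * 10 := by ring
      · rw [Nat.div_lt_iff_lt_mul (by norm_num)]
        calc b < 10 ^ (k+1) := hb
        _ = 10 ^ k * 10 := by ring
    omega

lemma digs_split (k : Nat) : ∀ a b, 0 < a → b < 10 ^ k →
    digs (a * 10 ^ k + b) = digs a ++ pad k b := by
  induction k with
  | zero =>
    intro a b ha hb
    have : b = 0 := by omega
    subst this
    simp [pad]
  | succ k ih =>
    intro a b ha hb
    have h10 : 10 ≤ a * 10 ^ (k+1) + b := by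
      have : (10:Nat) ≤ 10 ^ (k+1) := by
        calc (10:Nat) = 10 ^ 1 := by norm_num
        _ ≤ 10 ^ (k+1) := Nat.pow_le_pow_right (by norm_num) (by omega)
      nlinarith
    rw [digs_ge _ h10]
    have hdiv : (a * 10 ^ (k+1) + b) / 10 = a * 10 ^ k + b / 10 := by
      rw [pow_succ]
      rw [show a * (10 ^ k * 10) + b = (a * 10 ^ k) * 10 + b by ring]
      omega
    have hmod : (a * 10 ^ (k+1) + b) % 10 = b % 10 := by
      rw [pow_succ]
      rw [show a * (10 ^ k * 10) + b = (a * 10 ^ k) * 10 + b by ring]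
      omega
    rw [hdiv, hmod]
    have hb' : b / 10 < 10 ^ k := by
      rw [Nat.div_lt_iff_lt_mul (by norm_num)]
      calc b < 10 ^ (k+1) := hb
      _ = 10 ^ k * 10 := by ring
    rw [ih a (b / 10) ha hb']
    simp [pad]

lemma length_digs_eq_of_bounds (k h : Nat) (h1 : 10 ^ (k-1) ≤ h) (h2 : h < 10 ^ k)
    (hk : 0 < k) : (digs h).length = k := by
  have ha : (digs h).length ≤ k := length_digs_le k h h2 hk
  have hpos : 0 < h := by
    have : (1:Nat) ≤ 10 ^ (k-1) := Nat.one_le_pow _ _ (by norm_num)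
    omega
  by_contra hne
  have hlt : (digs h).length ≤ k - 1 := by omega
  have := lt_of_length_digs_le (k-1) h hlt
  omega

lemma digs_valid (k h : Nat) (hk : 0 < k) (h1 : 10 ^ (k-1) ≤ h) (h2 : h < 10 ^ k) :
    digs (h * (10 ^ k + 1)) = digs h ++ digs h ∧ (digs h).length = k := by
  have hlen := length_digs_eq_of_bounds k h h1 h2 hk
  have hpos : 0 < h := by
    have : (1:Nat) ≤ 10 ^ (k-1) := Nat.one_le_pow _ _ (by norm_num)
    omega
  constructor
  · rw [show h * (10 ^ k + 1) = h * 10 ^ k + h by ring]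
    rw [digs_split k h h hpos h2, pad_eq_digs k h hlen]
  · exact hlen

def validInt (n : Int) : Prop :=
  ∃ (k : Nat) (h : Int), 0 < k ∧ (10:Int)^(k-1) ≤ h ∧ h < 10^k ∧ n = h * (10^k + 1)

def condA (n : Int) : Bool :=
  let value := PySem.Int.toStr n
  let half := PySem.Int.floordiv (PySem.Str.len value) 2
  (PySem.Str.slice value none (some half) == PySem.Str.slice value (some half) none)

lemma halves_nat (m : Nat) :
    (digs m).take ((digs m).length / 2) = (digs m).drop ((digs m).length / 2) ↔
      ∃ k h : Nat, 0 < k ∧ 10^(k-1) ≤ h ∧ h < 10^k ∧ m = h * (10^k + 1) := by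
  constructor
  · intro heq
    have hL : 0 < (digs m).length := List.length_pos_iff.mpr (digs_ne_nil m)
    set L := (digs m).length with hLdef
    have hlen : (List.take (L / 2) (digs m)).length = (List.drop (L / 2) (digs m)).length := by
      rw [heq]
    rw [List.length_take, List.length_drop] at hlen
    have hj : L / 2 ≥ 1 := by omega
    set j := L / 2 with hjdef
    have hLeq : L = 2 * j := by omega
    set a := m / 10 ^ j with hadef
    set b := m % 10 ^ j with hbdef
    have hm : m = a * 10 ^ j + b := by
      rw [hadef, hbdef, Nat.mul_comm]
      exact (Nat.div_add_mod m (10 ^ j)).symm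
    have hb : b < 10 ^ j := Nat.mod_lt _ (Nat.pow_pos (by norm_num))
    have ha : 0 < a := by
      rcases Nat.eq_zero_or_pos a with ha0 | ha
      · exfalso
        have hmlt : m < 10 ^ j := by
          rw [hm, ha0]; simpa using hb
        have := length_digs_le j m hmlt (by omega)
        omega
      · exact ha
    have hsplit : digs m = digs a ++ pad j b := by
      rw [hm]; exact digs_split j a b ha hb
    have hlena : (digs a).length = j := by
      have : L = (digs a).length + j := by
        rw [hLdef, hsplit, List.length_append, length_pad]
      omega
    have htake : List.take j (digs m) = digs a := by
      rw [hsplit]; exact List.take_left' hlena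
    have hdrop : List.drop j (digs m) = pad j b := by
      rw [hsplit]; exact List.drop_left' hlena
    have hda : digs a = pad j b := by rw [← htake, ← hdrop]; exact heq
    have hpa : pad j a = digs a := pad_eq_digs j a hlena
    have haj : a < 10 ^ j := lt_of_length_digs_le j a (by omega)
    have hab : a = b := pad_inj j a b haj hb (by rw [hpa, hda])
    refine ⟨j, a, by omega, ?_, haj, by rw [hm, ← hab]; ring⟩
    have := le_of_length_digs a ha
    rw [hlena] at this
    exact this
  · rintro ⟨k, h, hk, h1, h2, rfl⟩
    obtain ⟨hsplit, hlen⟩ := digs_valid k h hk h1 h2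
    rw [hsplit]
    have hL : (digs h ++ digs h).length = 2 * k := by
      rw [List.length_append, hlen]; ring
    rw [hL]
    have : 2 * k / 2 = k := by omega
    rw [this, List.take_left' hlen, List.drop_left' hlen]

lemma condA_iff (n : Int) : condA n = true ↔ validInt n := by
  unfold condA
  simp only [beq_iff_eq, ← String.toList_inj, PySem.Str.toList_slice, PySem.Int.toList_toStr,
    PySem.Chars.slice_eq_listSlice, PySem.Str.len_eq, PySem.Int.toList_toStr]
  have hfd : PySem.Int.floordiv ((PySem.Int.toChars n).length : Int) 2 =
      (((PySem.Int.toChars n).length / 2 : Nat) : Int) := by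
    rw [PySem.Int.floordiv_eq_iff_of_pos (by norm_num)]
    constructor
    · push_cast
      omega
    · push_cast
      omega
  rw [hfd, PySem.List.slice_to_natCast, PySem.List.slice_from_natCast]
  rcases lt_or_ge n 0 with hneg | hpos
  · rw [toChars_neg n hneg]
    constructor
    · intro heq
      exfalso
      set s' := digs n.natAbs with hs'def
      have hL' : 0 < s'.length := List.length_pos_iff.mpr (digs_ne_nil _)
      set L := ('-' :: s').length with hLdef
      have hL : 2 ≤ L := by simp [hLdef]; omega
      set j := L / 2 with hjdef
      have hj : 1 ≤ j := by omega
      have hjL : j < L := by omega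
      have h0 : (List.take j ('-' :: s')).head? = some '-' := by
        rw [List.head?_take]
        simp
        omega
      have hdropeq : List.drop j ('-' :: s') = List.drop (j-1) s' := by
        rcases Nat.exists_eq_add_of_le hj with ⟨j', hj'⟩
        rw [hj', Nat.add_comm, List.drop_succ_cons]
        simp
      have h0' : (List.drop (j-1) s').head? = some '-' := by
        rw [← hdropeq, ← heq]; exact h0
      have hmem : '-' ∈ List.drop (j-1) s' := List.mem_of_mem_head? h0'
      have hmem2 : '-' ∈ s' := List.mem_of_mem_drop hmem
      obtain ⟨x, hx, hcx⟩ := mem_digs _ _ hmem2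
      exact digitChar_ne_dash x hx hcx.symm
    · rintro ⟨k, h, hk, h1, h2, heq⟩
      exfalso
      have : (0:Int) < h * (10 ^ k + 1) := by
        have hp : (0:Int) < 10 ^ (k-1) := by positivity
        have : (0:Int) < 10 ^ k + 1 := by positivity
        nlinarith
      omega
  · rw [toChars_nonneg n hpos]
    rw [halves_nat n.toNat]
    constructor
    · rintro ⟨k, h, hk, h1, h2, heq⟩
      refine ⟨k, (h : Int), hk, ?_, ?_, ?_⟩
      · push_cast; exact_mod_cast Nat.cast_le.mpr h1
      · exact_mod_cast Nat.cast_lt.mpr h2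
      · have : n = (n.toNat : Int) := by omega
        rw [this, heq]
        push_cast
        ring
    · rintro ⟨k, h, hk, h1, h2, heq⟩
      have hh0 : 0 ≤ h := by
        have : (0:Int) < 10 ^ (k-1) := by positivity
        omega
      have hc1 : ((10 ^ (k-1) : Nat) : Int) = (10:Int) ^ (k-1) := by push_cast; ring
      have hc2 : ((10 ^ k : Nat) : Int) = (10:Int) ^ k := by push_cast; ring
      refine ⟨k, h.toNat, hk, ?_, ?_, ?_⟩
      · rw [← hc1] at h1; omega
      · rw [← hc2] at h2; omega
      · have : n.toNat = (h * (10 ^ k + 1)).toNat := by rw [heq]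
        rw [this]
        have hcast : ((h * (10 ^ k + 1)).toNat : Int) = ((h.toNat * (10 ^ k + 1) : Nat) : Int) := by
          push_cast
          rw [Int.toNat_of_nonneg (by positivity : (0:Int) ≤ h * (10 ^ k + 1)),
              Int.toNat_of_nonneg hh0]
        exact_mod_cast hcast

def blockOf (lo hi p : Int) : List Int :=
  (PySem.List.pyRange (max p (-(PySem.Int.floordiv (-lo) (p * 10 + 1))))
      (min (p * 10 - 1) (PySem.Int.floordiv hi (p * 10 + 1)) + 1) 1).map (· * (p * 10 + 1))

def blocksUpto (lo hi : Int) : Nat → List Int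
  | 0 => []
  | t+1 => blocksUpto lo hi t ++ blockOf lo hi (10 ^ t)

lemma validInt_pos (n : Int) (hv : validInt n) : 11 ≤ n := by
  obtain ⟨k, h, hk, h1, h2, rfl⟩ := hv
  have hp1 : (1:Int) ≤ 10 ^ (k-1) := one_le_pow₀ (by norm_num)
  have hm : (11:Int) ≤ 10 ^ k + 1 := by
    have : (10:Int) ≤ 10 ^ k := by
      calc (10:Int) = 10 ^ 1 := by norm_num
      _ ≤ 10 ^ k := pow_le_pow_right₀ (by norm_num) (by omega)
    omega
  nlinarith

lemma portA_eq_filter (id_range : List Int) :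
    find_invalid_repeated_ids id_range =
      (PySem.List.pyRange (PySem.List.pyGetD id_range 0 0)
        (PySem.List.pyGetD id_range 1 0 + 1) 1).filter condA := by
  unfold find_invalid_repeated_ids
  have := PySem.List.foldl_append_if_eq_filter condA
    (PySem.List.pyRange (PySem.List.pyGetD id_range 0 0)
      (PySem.List.pyGetD id_range 1 0 + 1) 1) []
  simp only [List.nil_append] at this
  exact this

lemma floordiv_two_natCast (L : Nat) :
    PySem.Int.floordiv (L : Int) 2 = ((L / 2 : Nat) : Int) := by
  rw [PySem.Int.floordiv_eq_iff_of_pos (by norm_num)]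
  constructor <;> push_cast <;> omega

lemma portB_loop (lo hi : Int) (t : Nat) :
    (PySem.List.pyRange 0 (t : Int) 1).foldl
      (fun (st : Int × List Int) _ =>
        let p := st.1
        let q := p * 10
        let m := q + 1
        let hLo := max p (-(PySem.Int.floordiv (-lo) m))
        let hHi := min (q - 1) (PySem.Int.floordiv hi m)
        (q, (PySem.List.pyRange hLo (hHi + 1) 1).foldl (fun acc h => acc ++ [h * m]) st.2))
      (1, ([] : List Int)) = (10 ^ t, blocksUpto lo hi t) := by
  induction t with
  | zero =>
    rw [show ((0:Nat) : Int) = 0 by norm_num, PySem.List.pyRange_one_eq_nil le_rfl]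
    rfl
  | succ t ih =>
    rw [show ((t+1 : Nat) : Int) = (t : Int) + 1 by push_cast; ring]
    rw [PySem.List.pyRange_one_succ_right (by positivity)]
    rw [List.foldl_append, ih]
    show (10 ^ t * 10,
      (PySem.List.pyRange (max (10 ^ t) (-(PySem.Int.floordiv (-lo) (10 ^ t * 10 + 1))))
        (min (10 ^ t * 10 - 1) (PySem.Int.floordiv hi (10 ^ t * 10 + 1)) + 1) 1).foldl
        (fun acc h => acc ++ [h * (10 ^ t * 10 + 1)]) (blocksUpto lo hi t)) =
      (10 ^ (t+1), blocksUpto lo hi (t+1))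
    rw [PySem.List.foldl_append_singleton_eq_map]
    constructor

lemma pow_pred_mul (k : Nat) (hk : 0 < k) : (10:Int) ^ (k-1) * 10 = 10 ^ k := by
  rw [← pow_succ]
  congr 1
  omega

lemma mem_blockOf (lo hi x : Int) (k : Nat) (hk : 0 < k) :
    x ∈ blockOf lo hi ((10:Int) ^ (k-1)) ↔
      ∃ h : Int, (10:Int)^(k-1) ≤ h ∧ lo ≤ h * (10^k + 1) ∧ h < 10^k ∧ h * (10^k+1) ≤ hi ∧
        x = h * (10^k + 1) := by
  unfold blockOf
  rw [pow_pred_mul k hk]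
  simp only [List.mem_map, PySem.List.mem_pyRange_one]
  have hm : (0:Int) < 10 ^ k + 1 := by positivity
  constructor
  · rintro ⟨h, ⟨hge, hlt⟩, rfl⟩
    rw [max_le_iff] at hge
    have hceil : lo ≤ h * (10 ^ k + 1) := by
      have := (PySem.Int.le_floordiv_iff_mul_le (a := -lo) (q := -h) hm).mp (by omega)
      nlinarith [this]
    refine ⟨h, hge.1, hceil, by omega, ?_, rfl⟩
    have hle : h ≤ PySem.Int.floordiv hi (10 ^ k + 1) := by omega
    exact (PySem.Int.le_floordiv_iff_mul_le hm).mp hle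
  · rintro ⟨h, hge, hlo, hlt, hhi, rfl⟩
    refine ⟨h, ⟨?_, ?_⟩, rfl⟩
    · rw [max_le_iff]
      refine ⟨hge, ?_⟩
      have : -h ≤ PySem.Int.floordiv (-lo) (10 ^ k + 1) :=
        (PySem.Int.le_floordiv_iff_mul_le hm).mpr (by nlinarith)
      omega
    · have : h ≤ PySem.Int.floordiv hi (10 ^ k + 1) :=
        (PySem.Int.le_floordiv_iff_mul_le hm).mpr hhi
      omega

lemma mem_blocksUpto (lo hi x : Int) (t : Nat) :
    x ∈ blocksUpto lo hi t ↔
      ∃ k : Nat, 0 < k ∧ k ≤ t ∧ x ∈ blockOf lo hi ((10:Int) ^ (k-1)) := by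
  induction t with
  | zero =>
    constructor
    · intro h; simp [blocksUpto] at h
    · rintro ⟨k, hk, hkt, _⟩; omega
  | succ t ih =>
    show x ∈ blocksUpto lo hi t ++ blockOf lo hi (10 ^ t) ↔ _
    rw [List.mem_append, ih]
    constructor
    · rintro (⟨k, hk, hkt, hmem⟩ | hmem)
      · exact ⟨k, hk, by omega, hmem⟩
      · exact ⟨t+1, by omega, le_rfl, by simpa using hmem⟩
    · rintro ⟨k, hk, hkt, hmem⟩
      rcases Nat.lt_or_ge k (t+1) with hlt | hge
      · exact Or.inl ⟨k, hk, by omega, hmem⟩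
      · right
        have : k = t + 1 := by omega
        subst this
        simpa using hmem

lemma blockOf_bounds (lo hi x : Int) (k : Nat) (hk : 0 < k)
    (hmem : x ∈ blockOf lo hi ((10:Int) ^ (k-1))) :
    (10:Int) ^ (2*k-1) < x ∧ x < 10 ^ (2*k) := by
  rw [mem_blockOf lo hi x k hk] at hmem
  obtain ⟨h, h1, _, h2, _, rfl⟩ := hmem
  have e1 : (10:Int) ^ (2*k-1) = 10 ^ (k-1) * 10 ^ k := by
    rw [← pow_add]; congr 1; omega
  have e2 : (10:Int) ^ (2*k) = 10 ^ k * 10 ^ k := by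
    rw [← pow_add]; congr 1; omega
  have hp : (0:Int) < 10 ^ (k-1) := by positivity
  have hq : (0:Int) < 10 ^ k := by positivity
  constructor
  · rw [e1]; nlinarith
  · rw [e2]; nlinarith

lemma pairwise_blockOf (lo hi p : Int) (hp : 0 < p) :
    (blockOf lo hi p).Pairwise (· < ·) := by
  unfold blockOf
  refine List.Pairwise.map _ ?_ (PySem.List.pairwise_lt_pyRange_one _ _)
  intro a b hab
  have : (0:Int) < p * 10 + 1 := by nlinarith
  exact mul_lt_mul_of_pos_right hab this

lemma pairwise_blocksUpto (lo hi : Int) (t : Nat) :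
    (blocksUpto lo hi t).Pairwise (· < ·) := by
  induction t with
  | zero => exact List.Pairwise.nil
  | succ t ih =>
    show (blocksUpto lo hi t ++ blockOf lo hi (10 ^ t)).Pairwise (· < ·)
    rw [List.pairwise_append]
    refine ⟨ih, pairwise_blockOf lo hi _ (by positivity), ?_⟩
    intro x hx y hy
    obtain ⟨k, hk, hkt, hxk⟩ := (mem_blocksUpto lo hi x t).mp hx
    have hxb := (blockOf_bounds lo hi x k hk hxk).2
    have hyb : (10:Int) ^ (2*(t+1)-1) < y := by
      have := blockOf_bounds lo hi y (t+1) (by omega) (by simpa using hy)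
      exact this.1
    have hpow : (10:Int) ^ (2*k) ≤ 10 ^ (2*(t+1)-1) :=
      pow_le_pow_right₀ (by norm_num) (by omega)
    omega

lemma eq_of_pairwise_lt_of_mem_iff (l1 l2 : List Int)
    (h1 : l1.Pairwise (· < ·)) (h2 : l2.Pairwise (· < ·))
    (hm : ∀ x, x ∈ l1 ↔ x ∈ l2) : l1 = l2 := by
  have nd1 : l1.Nodup := h1.imp ne_of_lt
  have nd2 : l2.Nodup := h2.imp ne_of_lt
  have hperm : l1.Perm l2 := (List.perm_ext_iff_of_nodup nd1 nd2).mpr hm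
  exact List.eq_of_perm_of_sorted (fun a b _ _ hab hba => by omega) h1 h2 hperm

lemma len_toChars_eq (hi : Int) (h : 0 ≤ hi) :
    (PySem.Int.toChars hi).length = (digs hi.toNat).length := by
  rw [toChars_nonneg hi h]

lemma main_eq (lo hi : Int) :
    (PySem.List.pyRange lo (hi + 1) 1).filter condA =
      (if hi < 11 then []
       else blocksUpto lo hi ((PySem.Int.toChars hi).length / 2)) := by
  split_ifs with h11
  · rw [List.filter_eq_nil_iff]
    intro x hx hcx
    have hv := (condA_iff x).mp hcx
    have := validInt_pos x hv
    have := (PySem.List.mem_pyRange_one.mp hx).2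
    omega
  · rw [not_lt] at h11
    apply eq_of_pairwise_lt_of_mem_iff
    · exact (PySem.List.pairwise_lt_pyRange_one _ _).filter _
    · exact pairwise_blocksUpto lo hi _
    · intro x
      rw [List.mem_filter, PySem.List.mem_pyRange_one, mem_blocksUpto, condA_iff]
      set T := (PySem.Int.toChars hi).length / 2 with hT
      constructor
      · rintro ⟨⟨hlo, hhi⟩, hv⟩
        obtain ⟨k, h, hk, h1, h2, rfl⟩ := hv
        refine ⟨k, hk, ?_, ?_⟩
        · -- k ≤ T since h*(10^k+1) ≤ hi forces hi to have ≥ 2k digits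
          have hh0 : (0:Int) ≤ h := le_trans (by positivity) h1
          have hc1 : ((10 ^ (k-1) : Nat) : Int) = (10:Int) ^ (k-1) := by push_cast; ring
          have hc2 : ((10 ^ k : Nat) : Int) = (10:Int) ^ k := by push_cast; ring
          have hb1 : 10 ^ (k-1) ≤ h.toNat := by rw [← hc1] at h1; omega
          have hb2 : h.toNat < 10 ^ k := by rw [← hc2] at h2; omega
          obtain ⟨hsplit, hlen⟩ := digs_valid k h.toNat hk hb1 hb2
          have hx0 : (0:Int) ≤ h * (10 ^ k + 1) := by positivity
          have hxnat : (h * (10 ^ k + 1)).toNat = h.toNat * (10 ^ k + 1) := by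
            have : ((h * (10 ^ k + 1)).toNat : Int) = ((h.toNat * (10 ^ k + 1) : Nat) : Int) := by
              push_cast
              rw [Int.toNat_of_nonneg hx0, Int.toNat_of_nonneg hh0]
            exact_mod_cast this
          have hlx : (digs (h * (10 ^ k + 1)).toNat).length = 2 * k := by
            rw [hxnat, hsplit, List.length_append, hlen]
            ring
          have hmono : (digs (h * (10 ^ k + 1)).toNat).length ≤ (digs hi.toNat).length :=
            length_digs_mono _ _ (by omega)
          rw [hT, len_toChars_eq hi (by omega)]
          omega
        · rw [mem_blockOf lo hi _ k hk]
          exact ⟨h, h1, hlo, h2, by omega, rfl⟩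
      · rintro ⟨k, hk, hkT, hmem⟩
        rw [mem_blockOf lo hi _ k hk] at hmem
        obtain ⟨h, h1, hlo, h2, hhi, rfl⟩ := hmem
        exact ⟨⟨hlo, by omega⟩, ⟨k, h, hk, h1, h2, rfl⟩⟩

lemma portB_eq (id_range : List Int) :
    find_invalid_repeated_ids_alt id_range =
      (if PySem.List.pyGetD id_range 1 0 < 11 then []
       else blocksUpto (PySem.List.pyGetD id_range 0 0) (PySem.List.pyGetD id_range 1 0)
         ((PySem.Int.toChars (PySem.List.pyGetD id_range 1 0)).length / 2)) := by
  set lo := PySem.List.pyGetD id_range 0 0 with hlo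
  set hi := PySem.List.pyGetD id_range 1 0 with hhi
  have hlen : PySem.Str.len (PySem.Int.toStr hi) = ((PySem.Int.toChars hi).length : Int) := by
    rw [PySem.Str.len_eq, PySem.Int.toList_toStr]
  show (if hi < 11 then []
    else
      ((PySem.List.pyRange 0 (PySem.Int.floordiv (PySem.Str.len (PySem.Int.toStr hi)) 2) 1).foldl
        (fun (st : Int × List Int) _ =>
          let p := st.1
          let q := p * 10
          let m := q + 1
          let hLo := max p (-(PySem.Int.floordiv (-lo) m))
          let hHi := min (q - 1) (PySem.Int.floordiv hi m)
          (q, (PySem.List.pyRange hLo (hHi + 1) 1).foldl (fun acc h => acc ++ [h * m]) st.2))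
        (1, ([] : List Int))).2) = _
  split_ifs with h11
  · rfl
  · rw [hlen, floordiv_two_natCast]
    exact congrArg Prod.snd (portB_loop lo hi _)

-- ===== VERDICT (by name: the statement is the Claim_ definition above) =====
theorem find_invalid_repeated_ids_spec : Claim_equal_find_invalid_repeated_ids := by
  intro id_range _ _
  unfold Spec_find_invalid_repeated_ids
  rw [portA_eq_filter, portB_eq, main_eq]
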